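-- pv_equiv track=rewrite | github.com/Cha-Ji/Algorithm | LeetCode/20_09_2/Maximum Product Subarray.py | zeroPartition
-- ===== SOURCE A (Python) =====
-- def zeroPartition(nums):
--     zero_index_list = []
--     zero_count, end = nums.count(0), 0
--     for _ in range(zero_count):
--         this_zero = nums.index(0, end)
--         end = this_zero + 1
--         zero_index_list.append(this_zero)
--     return zero_index_list, zero_count
-- ===== SOURCE B (Python) =====
-- def zeroPartition(nums):
--     zero_index_list = []
--     for i, x in enumerate(nums):
--         if x == 0:
--             zero_index_list.append(i)
--     return zero_index_list, len(zero_index_list)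
-- ===== Notes on version B (the rewrite author's own statement) =====
-- stated objective: simpler
-- what changed: One enumerate pass collecting zero indices directly (count derived as the list's length) replaces A's two-phase scheme of count(0) followed by zero_count repeated index(0, end) scans.
import Mathlib
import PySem

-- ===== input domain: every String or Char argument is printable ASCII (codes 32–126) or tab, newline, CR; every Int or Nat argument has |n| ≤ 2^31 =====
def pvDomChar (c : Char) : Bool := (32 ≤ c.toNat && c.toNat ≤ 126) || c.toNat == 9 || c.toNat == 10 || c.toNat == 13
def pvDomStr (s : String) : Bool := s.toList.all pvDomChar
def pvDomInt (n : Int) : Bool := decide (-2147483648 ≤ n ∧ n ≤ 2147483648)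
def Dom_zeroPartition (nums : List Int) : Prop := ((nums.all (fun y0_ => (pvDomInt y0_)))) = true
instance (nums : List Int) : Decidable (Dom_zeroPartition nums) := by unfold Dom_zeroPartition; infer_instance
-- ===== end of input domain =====

-- B replaces A's count-then-repeated-index scans with one enumerate pass; the count is the list's length.

-- ===== PORT A =====
-- nums.index(0, end): first index ≥ end holding 0 (none if there is none; A's loop bound
-- guarantees it is always found, so the loop consumes the option with getD 0 on a branch
-- that is never reached).
def pyIndexZeroFrom (nums : List Int) (e : Nat) : Option Nat :=
  ((nums.drop e).findIdx? (fun x => x == 0)).map (· + e)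

-- the 'for _ in range(zero_count)' loop with state (end, zero_index_list)
def loopA (nums : List Int) : Nat → Nat → List Int → List Int
  | 0, _, acc => acc
  | k + 1, e, acc =>
    let thisZero := (pyIndexZeroFrom nums e).getD 0
    loopA nums k (thisZero + 1) (acc ++ [(thisZero : Int)])

def zeroPartition (nums : List Int) : List Int × Int :=
  let zeroCount := nums.count 0
  (loopA nums zeroCount 0 [], (zeroCount : Int))

-- ===== PORT B =====
def zeroPartition_alt (nums : List Int) : List Int × Int :=
  let l := (PySem.List.enumerate nums).foldl
    (fun acc p => if p.2 = 0 then acc ++ [p.1] else acc) []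
  (l, (l.length : Int))

-- ===== PRECONDITION & SPEC =====
def Spec_zeroPartition (nums : List Int) (out : List Int × Int) : Prop := out = zeroPartition_alt nums
instance (nums : List Int) (out : List Int × Int) : Decidable (Spec_zeroPartition nums out) := by unfold Spec_zeroPartition; infer_instance

-- ===== CLAIM (what is proved, stated in full; the proofs are below) =====
def Claim_equal_zeroPartition : Prop := ∀ (nums : List Int), Dom_zeroPartition nums → Spec_zeroPartition nums (zeroPartition nums)

-- ===== LEMMAS AND PROOFS =====

-- indices (offset by `off`) of the zeros of a list: the common normal form of both ports
def zsIdx : List Int → Int → List Int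
  | [], _ => []
  | x :: xs, off => if x = 0 then off :: zsIdx xs (off + 1) else zsIdx xs (off + 1)

theorem zsIdx_length (l : List Int) (off : Int) : (zsIdx l off).length = l.count 0 := by
  induction l generalizing off with
  | nil => simp [zsIdx]
  | cons x xs ih =>
    by_cases hx : x = 0 <;> simp [zsIdx, hx, ih]

theorem zsIdx_of_count_zero (l : List Int) (off : Int) (h : l.count 0 = 0) :
    zsIdx l off = [] := by
  induction l generalizing off with
  | nil => rfl
  | cons x xs ih =>
    rw [List.count_cons] at h
    by_cases hx : x = 0
    · simp [hx] at h
    · simp only [zsIdx, if_neg hx]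
      exact ih _ (by omega)

theorem zsIdx_split (l : List Int) (j : Nat) (off : Int)
    (h : l.findIdx? (fun x => x == 0) = some j) :
    zsIdx l off = (off + j) :: zsIdx (l.drop (j + 1)) (off + j + 1) ∧
    (l.drop (j + 1)).count 0 + 1 = l.count 0 := by
  induction l generalizing j off with
  | nil => simp at h
  | cons x xs ih =>
    rw [List.findIdx?_cons] at h
    by_cases hx : x = 0
    · simp [hx] at h
      subst h
      simp [zsIdx, hx]
    · simp [hx] at h
      obtain ⟨j', hj', rfl⟩ := h
      obtain ⟨h1, h2⟩ := ih j' (off + 1) hj'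
      refine ⟨?_, by simpa [List.count_cons, hx] using h2⟩
      simp only [zsIdx, if_neg hx, h1, List.drop_succ_cons, Nat.cast_add, Nat.cast_one]
      rw [show off + 1 + (j' : Int) = off + ((j' : Int) + 1) from by ring]

theorem loopA_eq (nums : List Int) (k e : Nat) (acc : List Int)
    (h : (nums.drop e).count 0 = k) :
    loopA nums k e acc = acc ++ zsIdx (nums.drop e) e := by
  induction k generalizing e acc with
  | zero => simp [loopA, zsIdx_of_count_zero _ _ h]
  | succ k ih =>
    cases hf : (nums.drop e).findIdx? (fun x => x == 0) with
    | none =>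
      rw [List.findIdx?_eq_none_iff] at hf
      have : (nums.drop e).count 0 = 0 := by
        rw [List.count_eq_zero]
        intro hm
        have := hf 0 hm
        simp at this
      omega
    | some j =>
      obtain ⟨h1, h2⟩ := zsIdx_split _ j (e : Int) hf
      have hdd : (nums.drop e).drop (j + 1) = nums.drop (j + 1 + e) := by
        rw [List.drop_drop]; congr 1; omega
      rw [hdd] at h1 h2
      simp only [loopA, pyIndexZeroFrom, hf, Option.map_some, Option.getD_some]
      rw [ih (j + e + 1) (acc ++ [((j + e : Nat) : Int)]) (by rw [show j + e + 1 = j + 1 + e by omega]; omega)]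
      rw [show j + e + 1 = j + 1 + e by omega, h1]
      simp
      constructor
      · ring
      · congr 1
        ring

theorem foldB_eq (xs : List Int) (off : Int) (acc : List Int) :
    (PySem.List.enumerate xs off).foldl
      (fun acc p => if p.2 = 0 then acc ++ [p.1] else acc) acc
    = acc ++ zsIdx xs off := by
  induction xs generalizing off acc with
  | nil => simp [PySem.List.enumerate_nil, zsIdx]
  | cons x xs ih =>
    rw [PySem.List.enumerate_cons]
    by_cases hx : x = 0 <;>
      simp [hx, List.foldl_cons, ih, zsIdx]

-- ===== VERDICT (by name: the statement is the Claim_ definition above) =====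
theorem zeroPartition_spec : Claim_equal_zeroPartition := by
  intro nums _
  simp only [Spec_zeroPartition, zeroPartition, zeroPartition_alt]
  rw [foldB_eq nums 0 [], loopA_eq nums (nums.count 0) 0 [] (by simp)]
  simp [zsIdx_length]
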